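-- pv_equiv track=rewrite | github.com/sbr69/BI_Agent | backend/core/query_engine.py | _infer_types
-- ===== SOURCE A (Python) =====
-- def _infer_types(columns: list[str], original_fields: list[str],
--                  rows: list[dict]) -> list[str]:
--     """Infer PostgreSQL column types from CSV data."""
--     sample = rows[:200]
--     types = []
--
--     for i, col in enumerate(columns):
--         orig_key = original_fields[i]
--
--         if "date" in col:
--             types.append("DATE")
--             continue
--
--         is_int = True
--         is_float = True
--         seen_value = False
--
--         for row in sample:
--             val = row.get(orig_key, "").strip()
--             if not val:
--                 continue
--             seen_value = True
--             try:
--                 int(val)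
--             except ValueError:
--                 is_int = False
--             try:
--                 float(val)
--             except ValueError:
--                 is_float = False
--                 is_int = False
--
--         if not seen_value:
--             types.append("TEXT")
--         elif is_int:
--             types.append("BIGINT")
--         elif is_float:
--             types.append("DOUBLE PRECISION")
--         else:
--             types.append("TEXT")
--
--     return types
-- ===== SOURCE B (Python) =====
-- def _infer_types(columns: list[str], original_fields: list[str],
--                  rows: list[dict]) -> list[str]:
--     """Infer PostgreSQL column types from CSV data."""
--     # One row-major sweep: fold every row's items into a dict mapping
--     # field key -> widest numeric rank seen (0 int, 1 float-only, 2 text).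
--     rank = {}
--     for row in rows[:200]:
--         for key, raw in row.items():
--             val = raw.strip()
--             if not val:
--                 continue
--             try:
--                 float(val)
--                 try:
--                     int(val)
--                     r = 0
--                 except ValueError:
--                     r = 1
--             except ValueError:
--                 r = 2
--             if r > rank.get(key, -1):
--                 rank[key] = r
--     names = ("BIGINT", "DOUBLE PRECISION", "TEXT")
--     out = []
--     for col, key in zip(columns, original_fields):
--         if "date" in col:
--             out.append("DATE")
--         elif key not in rank:
--             out.append("TEXT")
--         else:
--             out.append(names[rank[key]])
--     return out
-- ===== Notes on version B (the rewrite author's own statement) =====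
-- stated objective: faster
-- what changed: B inverts the loop nesting and changes the data structure: a single row-major sweep over the sample folds every row's items into one dict mapping field key to the widest numeric rank seen (0 int, 1 float-only, 2 text), then one translation pass over zip(columns, original_fields) looks the ranks up; A instead rescans all rows column-by-column threading two boolean flags per column.
import Mathlib
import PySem

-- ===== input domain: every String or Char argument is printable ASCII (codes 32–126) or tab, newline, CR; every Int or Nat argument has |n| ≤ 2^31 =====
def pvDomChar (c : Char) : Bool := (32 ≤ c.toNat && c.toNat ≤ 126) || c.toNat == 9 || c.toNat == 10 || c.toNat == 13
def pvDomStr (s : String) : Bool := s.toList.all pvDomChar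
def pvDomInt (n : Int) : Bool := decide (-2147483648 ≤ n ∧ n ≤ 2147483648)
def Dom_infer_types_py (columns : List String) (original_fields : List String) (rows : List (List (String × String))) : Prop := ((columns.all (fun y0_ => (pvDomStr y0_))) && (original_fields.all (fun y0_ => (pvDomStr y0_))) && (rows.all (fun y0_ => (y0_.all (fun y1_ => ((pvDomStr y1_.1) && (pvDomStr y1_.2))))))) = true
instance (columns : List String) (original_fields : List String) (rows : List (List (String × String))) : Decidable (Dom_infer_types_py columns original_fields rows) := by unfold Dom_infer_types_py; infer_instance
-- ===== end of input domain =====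

-- B inverts the loop nesting: one row-major sweep builds a dict of widest numeric rank
-- per field key, then a translation pass over zip(columns, original_fields); A rescans
-- the rows once per column with two boolean flags (objective: faster, measured).

-- ── shared ports of Python built-ins ──────────────────────────────────────────
-- `float(val)` success: hand port of CPython's float-literal recognizer
-- (exact on the printable-ASCII + tab/newline/CR domain; checked against CPython:
--  strip whitespace, optional sign, inf/infinity/nan case-insensitively, or
--  digits[.digits][(e|E)[sign]digits] with single underscores only between digits).
def pvIsFSpace (c : Char) : Bool :=
  c = ' ' || c = '\t' || c = '\n' || c = '\r' || c.toNat == 11 || c.toNat == 12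

-- consume `(digit | '_' digit)*` greedily, returning the remainder
def pvDigitsGo : List Char → List Char
  | c :: d :: rest =>
    if c.isDigit then pvDigitsGo (d :: rest)
    else if c = '_' && d.isDigit then pvDigitsGo rest
    else c :: d :: rest
  | [c] => if c.isDigit then [] else [c]
  | [] => []

-- `digit (digit | '_' digit)*`; none if no leading digit
def pvDigits1 : List Char → Option (List Char)
  | c :: rest => if c.isDigit then some (pvDigitsGo rest) else none
  | [] => none

-- optional exponent `(e|E) [sign] digits`, then end of string
def pvExpOk : List Char → Bool
  | [] => true
  | c :: rest =>
    if c = 'e' || c = 'E' then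
      match rest with
      | s :: rest2 =>
        if s = '+' || s = '-' then (pvDigits1 rest2 == some [])
        else (pvDigits1 rest == some [])
      | [] => false
    else false

-- `digits [ '.' [digits] ] exp?  |  '.' digits exp?`
def pvMantissaExp : List Char → Bool
  | '.' :: rest =>
    (match pvDigits1 rest with
     | some r => pvExpOk r
     | none => false)
  | t =>
    match pvDigits1 t with
    | some r =>
      (match r with
       | '.' :: rest2 =>
         (match rest2 with
          | d :: _ =>
            if d.isDigit then
              (match pvDigits1 rest2 with
               | some r3 => pvExpOk r3
               | none => false)
            else pvExpOk rest2
          | [] => pvExpOk rest2)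
       | _ => pvExpOk r)
    | none => false

def pvFloatOk (cs : List Char) : Bool :=
  let t := ((cs.dropWhile pvIsFSpace).reverse.dropWhile pvIsFSpace).reverse
  let t2 := match t with
            | c :: r => if c = '+' || c = '-' then r else t
            | [] => []
  let low := t2.map PySem.Chars.lowerChar
  if low = "inf".toList || low = "infinity".toList || low = "nan".toList then true
  else pvMantissaExp t2

-- `int(val)` success
def pvIntOk (cs : List Char) : Bool := (PySem.Int.ofChars? cs).isSome

-- `row.get(key, "")` on the dict
def pvRowGet (row : List (String × String)) (key : String) : String :=
  (PySem.Dict.ofList row).getD key ""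

-- ===== PORT A =====
-- A's per-column inner loop over the sample: state (is_int, is_float, seen_value)
def pvStepA (key : String) (st : Bool × Bool × Bool) (row : List (String × String)) :
    Bool × Bool × Bool :=
  let val := PySem.Str.strip (pvRowGet row key)
  if val = "" then st
  else
    let ii := if pvIntOk val.toList then st.1 else false
    let p := if pvFloatOk val.toList then (ii, st.2.1) else (false, false)
    (p.1, p.2, true)

-- A's outer loop: `for i, col in enumerate(columns)` with `orig_key = original_fields[i]`
-- (on IndexError — excluded by Pre_ — the port just stops)
def pvGoA (cols : List String) (i : Nat) (original_fields : List String)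
    (sample : List (List (String × String))) : List String :=
  match cols with
  | [] => []
  | col :: rest =>
    match PySem.List.pyGet? original_fields (Int.ofNat i) with
    | none => []
    | some key =>
      let entry :=
        if PySem.Str.isIn "date" col then "DATE"
        else
          let st := sample.foldl (pvStepA key) (true, true, false)
          if !st.2.2 then "TEXT"
          else if st.1 then "BIGINT"
          else if st.2.1 then "DOUBLE PRECISION"
          else "TEXT"
      entry :: pvGoA rest (i + 1) original_fields sample

def infer_types_py (columns : List String) (original_fields : List String) (rows : List (List (String × String))) : List String :=
  pvGoA columns 0 original_fields (rows.take 200)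

-- ===== PORT B =====
-- Source B's per-value classification: outer `try: float`, inner `try: int`
def pvRankB (val : String) : Int :=
  if pvFloatOk val.toList then (if pvIntOk val.toList then 0 else 1) else 2

-- Source B's inner statement: strip one item's value, skip if empty, widen the dict entry
def pvUpd (d : PySem.Dict String Int) (kv : String × String) : PySem.Dict String Int :=
  let val := PySem.Str.strip kv.2
  if val = "" then d
  else
    let r := pvRankB val
    if r > d.getD kv.1 (-1) then d.insert kv.1 r else d

-- ("BIGINT", "DOUBLE PRECISION", "TEXT")[r]
def pvNamesI (r : Int) : String :=
  if r = 0 then "BIGINT" else if r = 1 then "DOUBLE PRECISION" else "TEXT"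

def infer_types_py_alt (columns : List String) (original_fields : List String) (rows : List (List (String × String))) : List String :=
  let rank := (rows.take 200).foldl
      (fun d row => ((PySem.Dict.ofList row).items).foldl pvUpd d) PySem.Dict.empty
  (columns.zip original_fields).map (fun ck =>
    if PySem.Str.isIn "date" ck.1 then "DATE"
    else match rank.get? ck.2 with
         | none => "TEXT"
         | some r => pvNamesI r)

-- ===== PRECONDITION & SPEC =====
-- A indexes original_fields[i] for every column index i, so it raises IndexError
-- whenever columns is longer than original_fields; exactly those inputs are excluded.
def Pre_infer_types_py (columns : List String) (original_fields : List String) (rows : List (List (String × String))) : Prop :=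
  columns.length ≤ original_fields.length
instance (columns : List String) (original_fields : List String) (rows : List (List (String × String))) : Decidable (Pre_infer_types_py columns original_fields rows) := by unfold Pre_infer_types_py; infer_instance

def pvWitness_infer_types_py : List String × List String × (List (List (String × String))) :=
  (["n", "birth_date"], ["N", "BD"], [[("N", " 7 "), ("BD", "x")], [("N", "2.5")]])

def Spec_infer_types_py (columns : List String) (original_fields : List String) (rows : List (List (String × String))) (out : List String) : Prop := out = infer_types_py_alt columns original_fields rows
instance (columns : List String) (original_fields : List String) (rows : List (List (String × String))) (out : List String) : Decidable (Spec_infer_types_py columns original_fields rows out) := by unfold Spec_infer_types_py; infer_instance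

-- ===== CLAIM (what is proved, stated in full; the proofs are below) =====
def Claim_equal_infer_types_py : Prop := ∀ (columns : List String) (original_fields : List String) (rows : List (List (String × String))), Dom_infer_types_py columns original_fields rows → Pre_infer_types_py columns original_fields rows → Spec_infer_types_py columns original_fields rows (infer_types_py columns original_fields rows)

-- ===== LEMMAS AND PROOFS =====

-- A-side abstractions (proof-only)
-- rank of one value as A's two booleans see it
def pvRank (val : String) : Nat :=
  if !pvFloatOk val.toList then 2
  else if pvIntOk val.toList then 0
  else 1

def pvTable : Nat → String
  | 0 => "BIGINT"
  | 1 => "DOUBLE PRECISION"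
  | _ => "TEXT"

-- rank 0/1/2 seeding A's boolean pair (requires ii → ff)
def pvR0 (ii ff : Bool) : Nat := if ii then 0 else if ff then 1 else 2

-- the per-value flag update of A, on the (is_int, is_float) pair alone
def pvFlagStep (p : Bool × Bool) (v : String) : Bool × Bool :=
  let ii := if pvIntOk v.toList then p.1 else false
  if pvFloatOk v.toList then (ii, p.2) else (false, false)

lemma pvR0_step (ii ff : Bool) (h : ii = true → ff = true) (v : String) :
    pvR0 (pvFlagStep (ii, ff) v).1 (pvFlagStep (ii, ff) v).2 =
      Nat.max (pvR0 ii ff) (pvRank v) := by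
  unfold pvFlagStep pvR0 pvRank
  cases hi : pvIntOk v.toList <;> cases hf : pvFloatOk v.toList <;>
    cases ii <;> cases ff <;> simp_all

lemma pvFlagStep_mono (p : Bool × Bool) (v : String) (h : p.1 = true → p.2 = true) :
    (pvFlagStep p v).1 = true → (pvFlagStep p v).2 = true := by
  unfold pvFlagStep
  cases hi : pvIntOk v.toList <;> cases hf : pvFloatOk v.toList <;> simp_all

-- core: A's flag fold, classified, equals a max-of-ranks fold, translated
lemma pvCore (vals : List String) : ∀ (ii ff : Bool), (ii = true → ff = true) →
    (let q := vals.foldl pvFlagStep (ii, ff)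
     if q.1 then "BIGINT" else if q.2 then "DOUBLE PRECISION" else "TEXT") =
      pvTable (vals.foldl (fun m v => Nat.max m (pvRank v)) (pvR0 ii ff)) := by
  induction vals with
  | nil =>
    intro ii ff h
    cases ii <;> cases ff <;> simp_all [pvR0, pvTable]
  | cons v vs ih =>
    intro ii ff h
    have h2 := pvFlagStep_mono (ii, ff) v h
    have := ih (pvFlagStep (ii, ff) v).1 (pvFlagStep (ii, ff) v).2 h2
    simp only [List.foldl_cons]
    rw [← pvR0_step ii ff h v]
    simpa using this

-- A's sample fold equals the flag fold over the non-empty stripped values,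
-- with the seen flag recording non-emptiness
def pvVals (key : String) (sample : List (List (String × String))) : List String :=
  sample.filterMap (fun row =>
    let v := PySem.Str.strip (pvRowGet row key)
    if v = "" then none else some v)

lemma pvFoldA_eq (key : String) (sample : List (List (String × String))) :
    ∀ (st : Bool × Bool × Bool),
      sample.foldl (pvStepA key) st =
        (((pvVals key sample).foldl pvFlagStep (st.1, st.2.1)).1,
         ((pvVals key sample).foldl pvFlagStep (st.1, st.2.1)).2,
         (st.2.2 || !(pvVals key sample).isEmpty)) := by
  induction sample with
  | nil => intro st; simp [pvVals]
  | cons row rest ih =>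
    intro st
    simp only [List.foldl_cons, pvVals, List.filterMap_cons]
    by_cases hv : PySem.Str.strip (pvRowGet row key) = ""
    · simp only [hv, reduceIte]
      have : pvStepA key st row = st := by
        unfold pvStepA; simp [hv]
      rw [this]
      simpa [pvVals] using ih st
    · simp only [if_neg hv]
      have hstep : pvStepA key st row =
          ((pvFlagStep (st.1, st.2.1) (PySem.Str.strip (pvRowGet row key))).1,
           (pvFlagStep (st.1, st.2.1) (PySem.Str.strip (pvRowGet row key))).2, true) := by
        unfold pvStepA pvFlagStep
        simp [hv]
      rw [hstep]
      have := ih ((pvFlagStep (st.1, st.2.1) (PySem.Str.strip (pvRowGet row key))).1,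
        (pvFlagStep (st.1, st.2.1) (PySem.Str.strip (pvRowGet row key))).2, true)
      simpa [pvVals, List.foldl_cons] using this

-- A's per-column value in terms of the ranks list
lemma pvCol_eq (key : String) (sample : List (List (String × String))) :
    (let st := sample.foldl (pvStepA key) (true, true, false)
     if !st.2.2 then "TEXT"
     else if st.1 then "BIGINT"
     else if st.2.1 then "DOUBLE PRECISION"
     else "TEXT") =
      (match sample.filterMap (fun row =>
          let v := PySem.Str.strip (pvRowGet row key)
          if v = "" then none else some (pvRank v)) with
       | [] => "TEXT"
       | r :: rs => pvTable (rs.foldl Nat.max r)) := by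
  have hranks : sample.filterMap (fun row =>
      let v := PySem.Str.strip (pvRowGet row key)
      if v = "" then none else some (pvRank v)) = (pvVals key sample).map pvRank := by
    unfold pvVals
    rw [List.map_filterMap]
    congr 1
    funext row
    by_cases hv : PySem.Str.strip (pvRowGet row key) = "" <;> simp [hv]
  rw [pvFoldA_eq key sample (true, true, false), hranks]
  cases hvals : pvVals key sample with
  | nil => simp
  | cons v vs =>
    simp only [List.isEmpty_cons, Bool.not_false, Bool.false_or, Bool.not_true,
      Bool.false_eq_true, if_false, List.map_cons, List.foldl_cons]
    have hmono : (pvFlagStep (true, true) v).1 = true → (pvFlagStep (true, true) v).2 = true :=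
      pvFlagStep_mono (true, true) v (by simp)
    have hcore := pvCore vs (pvFlagStep (true, true) v).1 (pvFlagStep (true, true) v).2 hmono
    have hseed : pvR0 (pvFlagStep (true, true) v).1 (pvFlagStep (true, true) v).2 = pvRank v := by
      have := pvR0_step true true (by simp) v
      simpa [pvR0] using this
    rw [hseed] at hcore
    have hfold : vs.foldl (fun m v => Nat.max m (pvRank v)) (pvRank v) =
        (vs.map pvRank).foldl Nat.max (pvRank v) := by
      rw [List.foldl_map]
    rw [hfold] at hcore
    simpa using hcore

-- ── B-side: projecting the dict fold to one key ──────────────────────────────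

-- effect of processing one raw value on the dict entry of its own key
def pvG (o : Option Int) (raw : String) : Option Int :=
  let v := PySem.Str.strip raw
  if v = "" then o
  else match o with
       | none => some (pvRankB v)
       | some m => if pvRankB v > m then some (pvRankB v) else some m

lemma pvRankB_nonneg (v : String) : 0 ≤ pvRankB v := by
  unfold pvRankB; split_ifs <;> norm_num

lemma pvRankB_eq (v : String) : pvRankB v = (pvRank v : Int) := by
  unfold pvRankB pvRank
  cases hf : pvFloatOk v.toList <;> cases hi : pvIntOk v.toList <;> simp

lemma get?_pvUpd (d : PySem.Dict String Int) (kv : String × String) (k : String) :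
    (pvUpd d kv).get? k = if kv.1 = k then pvG (d.get? k) kv.2 else d.get? k := by
  unfold pvUpd pvG
  by_cases hv : PySem.Str.strip kv.2 = ""
  · simp [hv]
  · simp only [if_neg hv]
    by_cases hk : kv.1 = k
    · subst hk
      cases ho : d.get? kv.1 with
      | none =>
        have hd : d.getD kv.1 (-1) = -1 := PySem.Dict.getD_of_get?_eq_none _ _ ho
        have hgt : pvRankB (PySem.Str.strip kv.2) > d.getD kv.1 (-1) := by
          rw [hd]; have := pvRankB_nonneg (PySem.Str.strip kv.2); omega
        rw [if_pos hgt, if_pos rfl, PySem.Dict.get?_insert_self]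
      | some m =>
        have hd : d.getD kv.1 (-1) = m := PySem.Dict.getD_of_get?_eq_some _ _ ho
        rw [hd, if_pos rfl]
        by_cases hc : pvRankB (PySem.Str.strip kv.2) > m
        · rw [if_pos hc, PySem.Dict.get?_insert_self]
          simp [hc]
        · rw [if_neg hc, ho]
          simp [hc]
    · rw [if_neg hk]
      by_cases hc : pvRankB (PySem.Str.strip kv.2) > d.getD kv.1 (-1)
      · rw [if_pos hc, PySem.Dict.get?_insert, if_neg (fun h => hk (Eq.symm h))]
      · rw [if_neg hc]

-- folding pvUpd over any pair list, projected to key k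
lemma get?_foldl_pvUpd (l : List (String × String)) (d : PySem.Dict String Int) (k : String) :
    (l.foldl pvUpd d).get? k =
      ((l.filter (fun p => p.1 = k)).map Prod.snd).foldl pvG (d.get? k) := by
  induction l generalizing d with
  | nil => rfl
  | cons p t ih =>
    simp only [List.foldl_cons, List.filter_cons]
    by_cases hk : p.1 = k
    · simp only [hk, decide_true, if_pos, List.map_cons, List.foldl_cons]
      rw [ih, get?_pvUpd, if_pos hk]
    · simp only [hk, decide_false, Bool.false_eq_true, if_false]
      rw [ih, get?_pvUpd, if_neg hk]

-- in a list with distinct keys, the pairs at key k are exactly find?'s answer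
lemma filter_key_of_nodup (l : List (String × String)) (k : String)
    (h : (l.map Prod.fst).Nodup) :
    l.filter (fun p => p.1 = k) = (l.find? (fun p => p.1 = k)).toList := by
  induction l with
  | nil => rfl
  | cons p t ih =>
    simp only [List.map_cons, List.nodup_cons] at h
    by_cases hk : p.1 = k
    · have : t.filter (fun p => p.1 = k) = [] := by
        rw [List.filter_eq_nil_iff]
        intro q hq hq'
        exact h.1 (by subst hk; simp at hq'; rw [← hq']; exact List.mem_map_of_mem hq)
      simp [List.find?, hk, this]
    · simp only [List.filter_cons, List.find?, hk, decide_false]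
      simpa using ih h.2

-- one row's item fold, projected to key k, is pvG with the row's looked-up value
lemma row_contrib (row : List (String × String)) (d : PySem.Dict String Int) (k : String) :
    (((PySem.Dict.ofList row).items).foldl pvUpd d).get? k =
      pvG (d.get? k) (pvRowGet row k) := by
  rw [get?_foldl_pvUpd]
  have hnd : ((PySem.Dict.ofList row).items.map Prod.fst).Nodup :=
    PySem.Dict.nodup_keys_ofList row
  rw [filter_key_of_nodup _ _ hnd]
  have hempty : PySem.Str.strip "" = "" := by decide
  cases hg : (PySem.Dict.ofList row).get? k with
  | none =>
    have hf : (PySem.Dict.ofList row).items.find? (fun p => p.1 = k) = none := by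
      rw [List.find?_eq_none]
      intro p hp hpk
      have : (PySem.Dict.ofList row).get? k = some p.2 := by
        have := PySem.Dict.get?_of_mem_items (d := PySem.Dict.ofList row) (k := p.1) (v := p.2)
          (by simpa using hp) hnd
        simpa [of_decide_eq_true hpk] using this
      simp [hg] at this
    rw [hf]
    have hget : pvRowGet row k = "" := by
      unfold pvRowGet; exact PySem.Dict.getD_of_get?_eq_none _ _ hg
    rw [hget]
    simp [pvG, hempty]
  | some v =>
    have hmem : (k, v) ∈ (PySem.Dict.ofList row).items :=
      PySem.Dict.mem_items_of_get?_eq_some _ hg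
    have hf : (PySem.Dict.ofList row).items.find? (fun p => p.1 = k) = some (k, v) := by
      cases hfind : (PySem.Dict.ofList row).items.find? (fun p => p.1 = k) with
      | none =>
        rw [List.find?_eq_none] at hfind
        exact absurd (by simp) (hfind (k, v) hmem)
      | some q =>
        have hq := List.find?_some hfind
        have hqm := List.mem_of_find?_eq_some hfind
        have hqk : q.1 = k := of_decide_eq_true hq
        have : (PySem.Dict.ofList row).get? k = some q.2 := by
          have := PySem.Dict.get?_of_mem_items (d := PySem.Dict.ofList row) (k := q.1) (v := q.2)
            (by simpa using hqm) hnd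
          simpa [hqk] using this
        rw [hg] at this
        cases q
        simp_all
    rw [hf]
    have hget : pvRowGet row k = v := by
      unfold pvRowGet; exact PySem.Dict.getD_of_get?_eq_some _ _ hg
    rw [hget]
    simp

-- the whole sample fold, projected to key k
lemma sample_contrib (sample : List (List (String × String)))
    (d : PySem.Dict String Int) (k : String) :
    ((sample.foldl (fun d row => ((PySem.Dict.ofList row).items).foldl pvUpd d) d).get? k) =
      (sample.map (fun row => pvRowGet row k)).foldl pvG (d.get? k) := by
  induction sample generalizing d with
  | nil => rfl
  | cons row rest ih =>
    simp only [List.foldl_cons, List.map_cons]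
    rw [ih, row_contrib]

-- pvG folds compute the max of the ranks list
lemma pvG_step_some (raw : String) (m : Nat) (hv : ¬ PySem.Str.strip raw = "") :
    pvG (some (m : Int)) raw =
      some ((Nat.max m (pvRank (PySem.Str.strip raw)) : Nat) : Int) := by
  unfold pvG
  simp only [if_neg hv, pvRankB_eq]
  have hm : Nat.max m (pvRank (PySem.Str.strip raw)) = max m (pvRank (PySem.Str.strip raw)) := rfl
  by_cases hc : m < pvRank (PySem.Str.strip raw)
  · rw [if_pos (by exact_mod_cast hc), hm, Nat.max_eq_right (Nat.le_of_lt hc)]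
  · rw [if_neg (by exact_mod_cast hc), hm, Nat.max_eq_left (Nat.le_of_not_lt hc)]

lemma pvG_fold_some (raws : List String) : ∀ (m : Nat),
    raws.foldl pvG (some (m : Int)) =
      some (((raws.filterMap (fun raw =>
        let v := PySem.Str.strip raw
        if v = "" then none else some (pvRank v))).foldl Nat.max m : Nat) : Int) := by
  induction raws with
  | nil => intro m; simp
  | cons raw t ih =>
    intro m
    simp only [List.foldl_cons, List.filterMap_cons]
    by_cases hv : PySem.Str.strip raw = ""
    · simp only [hv, reduceIte]
      have : pvG (some (m : Int)) raw = some (m : Int) := by simp [pvG, hv]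
      rw [this]; exact ih m
    · simp only [if_neg hv, List.foldl_cons]
      rw [pvG_step_some raw m hv]; exact ih _

lemma pvG_fold_none (raws : List String) :
    raws.foldl pvG none =
      (match raws.filterMap (fun raw =>
          let v := PySem.Str.strip raw
          if v = "" then none else some (pvRank v)) with
       | [] => none
       | r :: rs => some ((rs.foldl Nat.max r : Nat) : Int)) := by
  induction raws with
  | nil => rfl
  | cons raw t ih =>
    simp only [List.foldl_cons, List.filterMap_cons]
    by_cases hv : PySem.Str.strip raw = ""
    · simp only [hv, reduceIte]
      have : pvG none raw = none := by simp [pvG, hv]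
      rw [this]; exact ih
    · simp only [if_neg hv]
      have : pvG none raw = some ((pvRank (PySem.Str.strip raw) : Nat) : Int) := by
        unfold pvG
        rw [if_neg hv]
        exact congrArg some (pvRankB_eq _)
      rw [this, pvG_fold_some]

lemma pvNamesI_cast (n : Nat) : pvNamesI (n : Int) = pvTable n := by
  match n with
  | 0 => rfl
  | 1 => rfl
  | n + 2 =>
    unfold pvNamesI
    rw [if_neg (by omega), if_neg (by omega)]
    rfl

-- outer loop of A: indexed recursion equals zip-map
lemma pvGo_eq (cols : List String) : ∀ (i : Nat) (ofs : List String)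
    (sample : List (List (String × String))), i + cols.length ≤ ofs.length →
    pvGoA cols i ofs sample =
      (cols.zip (ofs.drop i)).map (fun ck =>
        if PySem.Str.isIn "date" ck.1 then "DATE"
        else
          match sample.filterMap (fun row =>
              let v := PySem.Str.strip (pvRowGet row ck.2)
              if v = "" then none else some (pvRank v)) with
          | [] => "TEXT"
          | r :: rs => pvTable (rs.foldl Nat.max r)) := by
  induction cols with
  | nil => intro i ofs sample h; simp [pvGoA]
  | cons col rest ih =>
    intro i ofs sample h
    have hi : i < ofs.length := by simp at h; omega
    have hget : PySem.List.pyGet? ofs (Int.ofNat i) = some ofs[i] := by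
      have := PySem.List.pyGet?_natCast (xs := ofs) (n := i)
      simp [Int.ofNat_eq_natCast, hi]
    have hdrop : ofs.drop i = ofs[i] :: ofs.drop (i + 1) :=
      List.drop_eq_getElem_cons hi
    unfold pvGoA
    rw [hget, hdrop]
    simp only [List.zip_cons_cons, List.map_cons]
    congr 1
    · by_cases hd : PySem.Str.isIn "date" col = true
      · rw [hd]; simp
      · rw [if_neg hd, if_neg hd]
        exact pvCol_eq ofs[i] sample
    · exact ih (i + 1) ofs sample (by simp at h ⊢; omega)

-- B's column body in terms of the same ranks list
lemma pvColB_eq (key : String) (sample : List (List (String × String))) :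
    (match ((sample.foldl (fun d row => ((PySem.Dict.ofList row).items).foldl pvUpd d)
        PySem.Dict.empty).get? key) with
     | none => "TEXT"
     | some r => pvNamesI r) =
      (match sample.filterMap (fun row =>
          let v := PySem.Str.strip (pvRowGet row key)
          if v = "" then none else some (pvRank v)) with
       | [] => "TEXT"
       | r :: rs => pvTable (rs.foldl Nat.max r)) := by
  rw [sample_contrib, PySem.Dict.get?_empty, pvG_fold_none]
  have hcomp : (sample.map (fun row => pvRowGet row key)).filterMap (fun raw =>
      let v := PySem.Str.strip raw
      if v = "" then none else some (pvRank v)) =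
        sample.filterMap (fun row =>
          let v := PySem.Str.strip (pvRowGet row key)
          if v = "" then none else some (pvRank v)) := by
    rw [List.filterMap_map]; rfl
  rw [hcomp]
  cases sample.filterMap (fun row =>
      let v := PySem.Str.strip (pvRowGet row key)
      if v = "" then none else some (pvRank v)) with
  | nil => rfl
  | cons r rs => exact pvNamesI_cast _

-- ===== VERDICT (by name: the statement is the Claim_ definition above) =====
theorem infer_types_py_spec : Claim_equal_infer_types_py := by
  intro columns original_fields rows _ hpre
  unfold Spec_infer_types_py infer_types_py infer_types_py_alt
  rw [pvGo_eq columns 0 original_fields (rows.take 200) (by simpa using hpre)]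
  simp only [List.drop_zero]
  apply List.map_congr_left
  intro ck _
  split_ifs with hd
  · rfl
  · exact (pvColB_eq ck.2 (rows.take 200)).symm
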